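-- pv_equiv track=rewrite | github.com/blackoutjack/rjtools.util | convert.py | parse_nonnumeric
-- ===== SOURCE A (Python) =====
-- def parse_nonnumeric(inputStr):
--     """Get the next nonnumeric, whitespace-delimited word from the input
--
--     :param inputStr: string to parse for a numeric prefix
--     :return: (string, string), parsed word and remaining string portion
--     """
--     inputStr = inputStr.lstrip()
--     text = ""
--     remaining = ""
--     for i, c in enumerate(inputStr):
--         if c.isdigit() or c.isspace():
--             remaining = inputStr[i:]
--             break
--         text += c
--     text = text.strip().rstrip(".")
--     return text, remaining
-- ===== SOURCE B (Python) =====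
-- def parse_nonnumeric(inputStr):
--     """Get the next nonnumeric, whitespace-delimited word from the input
--
--     :param inputStr: string to parse for a numeric prefix
--     :return: (string, string), parsed word and remaining string portion
--     """
--     stripped = inputStr.lstrip()
--     cut = next((i for i, c in enumerate(stripped) if c.isdigit() or c.isspace()),
--                len(stripped))
--     return stripped[:cut].rstrip("."), stripped[cut:]
-- ===== Notes on version B (the rewrite author's own statement) =====
-- stated objective: simpler
-- what changed: Replaces the char-by-char accumulating loop with break and separate text/remaining state by computing a single cut index (first digit-or-whitespace position) and returning two slices of the lstripped string, dropping the redundant .strip().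
import Mathlib
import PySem

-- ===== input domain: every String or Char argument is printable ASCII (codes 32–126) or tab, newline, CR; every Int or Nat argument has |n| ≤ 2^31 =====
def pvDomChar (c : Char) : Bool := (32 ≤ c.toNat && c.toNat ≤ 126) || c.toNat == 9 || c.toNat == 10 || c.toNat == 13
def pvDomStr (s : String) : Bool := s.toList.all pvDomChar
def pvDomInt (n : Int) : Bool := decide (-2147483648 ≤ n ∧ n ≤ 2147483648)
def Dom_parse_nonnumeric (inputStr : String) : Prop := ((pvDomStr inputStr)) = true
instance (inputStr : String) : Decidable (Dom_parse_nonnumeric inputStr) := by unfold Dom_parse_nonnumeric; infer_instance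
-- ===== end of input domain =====

-- B replaces A's accumulating scan-with-break by computing one cut index and slicing; objective: simpler.

-- shared builtin: c.isdigit() or c.isspace() (the loop's break test)
def pvP (c : Char) : Bool := PySem.Chars.isdigit c || PySem.Chars.isspace c

-- exact port of s.rstrip(".") on the ASCII domain: drop trailing '.' characters
def pvRstripDots (cs : List Char) : List Char :=
  (cs.reverse.dropWhile (· == '.')).reverse

-- ===== PORT A =====
-- the for-loop over enumerate(inputStr) with break; i is the running index into `stripped`
def loopA (stripped : List Char) : List Char → Int → List Char → (List Char × List Char)
  | [], _, text => (text, [])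
  | c :: rest, i, text =>
    if pvP c then (text, PySem.List.slice stripped (some i) none)   -- remaining = inputStr[i:]; break
    else loopA stripped rest (i + 1) (text ++ [c])                  -- text += c

def parse_nonnumeric (inputStr : String) : String × String :=
  let stripped := PySem.Chars.lstrip inputStr.toList
  let (text, remaining) := loopA stripped stripped 0 []
  (String.ofList (pvRstripDots (PySem.Chars.strip text)), String.ofList remaining)

-- ===== PORT B =====
-- cut = first index whose char is a digit or whitespace (len(stripped) if none); then slice twice.
-- List.take/drop are exact for stripped[:cut]/stripped[cut:] since 0 ≤ cut ≤ len(stripped).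
def parse_nonnumeric_alt (inputStr : String) : String × String :=
  let cs := PySem.Chars.lstrip inputStr.toList
  let cut := cs.findIdx pvP
  (String.ofList (pvRstripDots (cs.take cut)), String.ofList (cs.drop cut))

-- ===== PRECONDITION & SPEC =====
def Spec_parse_nonnumeric (inputStr : String) (out : String × String) : Prop := out = parse_nonnumeric_alt inputStr
instance (inputStr : String) (out : String × String) : Decidable (Spec_parse_nonnumeric inputStr out) := by unfold Spec_parse_nonnumeric; infer_instance

-- ===== CLAIM (what is proved, stated in full; the proofs are below) =====
def Claim_equal_parse_nonnumeric : Prop := ∀ (inputStr : String), Dom_parse_nonnumeric inputStr → Spec_parse_nonnumeric inputStr (parse_nonnumeric inputStr)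

-- ===== LEMMAS AND PROOFS =====

-- A's loop splits its suffix at the first digit/space char, accumulating the prefix onto `text`.
theorem loopA_spec (stripped : List Char) : ∀ (suf : List Char) (k : Nat) (text : List Char),
    stripped.drop k = suf →
    loopA stripped suf (k : Int) text =
      (text ++ suf.takeWhile (fun c => !pvP c), suf.dropWhile (fun c => !pvP c)) := by
  intro suf
  induction suf with
  | nil => intro k text h; simp [loopA]
  | cons c rest ih =>
    intro k text h
    by_cases hp : pvP c
    · simp [loopA, hp, List.takeWhile, List.dropWhile]
      exact h
    · have h2 : stripped.drop (k + 1) = rest := by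
        have := congrArg (List.drop 1) h
        simpa [List.drop_drop] using this
      have hrec := ih (k + 1) (text ++ [c]) h2
      push_cast at hrec
      simp [loopA, hp, List.takeWhile, List.dropWhile, hrec]

-- take/drop at findIdx is takeWhile/dropWhile of the negated predicate
theorem take_drop_findIdx (p : Char → Bool) (l : List Char) :
    l.take (l.findIdx p) = l.takeWhile (fun c => !p c) ∧
    l.drop (l.findIdx p) = l.dropWhile (fun c => !p c) := by
  induction l with
  | nil => simp
  | cons c rest ih =>
    by_cases h : p c <;> simp [List.findIdx_cons, List.takeWhile, List.dropWhile, h, ih]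

-- A's redundant text.strip() is the identity: text contains no whitespace
theorem strip_of_no_space (l : List Char) (h : ∀ c ∈ l, PySem.Chars.isspace c = false) :
    PySem.Chars.strip l = l := by
  have h1 : l.dropWhile PySem.Chars.isspace = l := by
    rw [List.dropWhile_eq_self_iff]; intro hl; simp [h _ (List.getElem_mem hl)]
  have h2 : l.reverse.dropWhile PySem.Chars.isspace = l.reverse := by
    rw [List.dropWhile_eq_self_iff]; intro hl; simp
    exact h _ (List.getElem_mem _)
  simp [PySem.Chars.strip, PySem.Chars.lstrip, PySem.Chars.rstrip, h1, h2]

-- ===== VERDICT (by name: the statement is the Claim_ definition above) =====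
theorem parse_nonnumeric_spec : Claim_equal_parse_nonnumeric := by
  intro inputStr _
  unfold Spec_parse_nonnumeric parse_nonnumeric parse_nonnumeric_alt
  set cs := PySem.Chars.lstrip inputStr.toList with hcs
  have hloop := loopA_spec cs cs 0 [] (by simp)
  push_cast at hloop
  have htd := take_drop_findIdx pvP cs
  have hstrip : PySem.Chars.strip (cs.takeWhile (fun c => !pvP c)) =
      cs.takeWhile (fun c => !pvP c) := by
    apply strip_of_no_space
    intro c hc
    have := List.mem_takeWhile_imp hc
    simp [pvP] at this
    exact this.2
  simp [hloop, htd.1, htd.2, hstrip]
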